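-- pv_equiv track=rewrite | github.com/ryandavis3/leetcode | eliminate_max_monsters_ii.py | eliminate_max
-- ===== SOURCE A (Python) =====
-- from typing import List
--
-- def eliminate_max(times_to_city: List[int]) -> int:
--     num_monsters = 0
--     while times_to_city:
--         if times_to_city[0] <= 0:
--             return num_monsters
--         elif times_to_city[0] >= len(times_to_city):
--             return num_monsters + len(times_to_city)
--         num_monsters += 1
--         times_to_city = [time_to_city - 1 for time_to_city in times_to_city[1:]]
--     return num_monsters
-- ===== SOURCE B (Python) =====
-- def eliminate_max(times_to_city):
--     # One pass: at step k the front of A's rebuilt list equals times_to_city[k] - k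
--     # and the remaining length is n - k.
--     n = len(times_to_city)
--     for k, t in enumerate(times_to_city):
--         if t - k <= 0:
--             return k
--         if t - k >= n - k:
--             return n
--     return n
-- ===== Notes on version B (the rewrite author's own statement) =====
-- stated objective: alternative
-- what changed: Replace the while loop that rebuilds a decremented copy of the tail each iteration with a single index pass using the invariant front-at-step-k = times[k]-k, remaining length = n-k; same measured speed on the random timing family, where A returns early.
import Mathlib
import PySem

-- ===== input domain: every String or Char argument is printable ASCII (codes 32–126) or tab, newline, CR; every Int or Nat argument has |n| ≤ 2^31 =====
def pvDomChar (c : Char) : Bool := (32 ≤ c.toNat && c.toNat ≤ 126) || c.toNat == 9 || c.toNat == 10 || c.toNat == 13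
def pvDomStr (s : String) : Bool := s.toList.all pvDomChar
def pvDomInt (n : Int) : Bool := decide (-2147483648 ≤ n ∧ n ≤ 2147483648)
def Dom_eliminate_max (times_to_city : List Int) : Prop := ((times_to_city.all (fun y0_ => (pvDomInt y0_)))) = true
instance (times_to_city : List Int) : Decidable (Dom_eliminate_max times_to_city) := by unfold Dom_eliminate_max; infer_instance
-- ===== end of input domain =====

-- B replaces A's rebuild-the-list loop by one index pass over the original list (invariant: front at step k = times[k]-k).


-- ===== PORT A =====
-- A's while loop: accumulator num_monsters, list rebuilt as decremented tail each round.
def eliminate_max_go (ts : List Int) (num_monsters : Int) : Int :=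
  match ts with
  | [] => num_monsters
  | t :: rest =>
    if t ≤ 0 then num_monsters
    else if t ≥ ((t :: rest).length : Int) then num_monsters + ((t :: rest).length : Int)
    else eliminate_max_go (rest.map (fun x => x - 1)) (num_monsters + 1)
termination_by ts.length
decreasing_by simp

def eliminate_max (times_to_city : List Int) : Int :=
  eliminate_max_go times_to_city 0

-- ===== PORT B =====
-- B's single pass: index k walks the original list, comparing t - k against 0 and n - k.
def eliminate_max_alt_go (n : Int) (k : Int) (ts : List Int) : Int :=
  match ts with
  | [] => n
  | t :: rest =>
    if t - k ≤ 0 then k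
    else if t - k ≥ n - k then n
    else eliminate_max_alt_go n (k + 1) rest

def eliminate_max_alt (times_to_city : List Int) : Int :=
  eliminate_max_alt_go (times_to_city.length : Int) 0 times_to_city

-- ===== PRECONDITION & SPEC =====
def Spec_eliminate_max (times_to_city : List Int) (out : Int) : Prop := out = eliminate_max_alt times_to_city
instance (times_to_city : List Int) (out : Int) : Decidable (Spec_eliminate_max times_to_city out) := by unfold Spec_eliminate_max; infer_instance

-- ===== CLAIM (what is proved, stated in full; the proofs are below) =====
def Claim_equal_eliminate_max : Prop := ∀ (times_to_city : List Int), Dom_eliminate_max times_to_city → Spec_eliminate_max times_to_city (eliminate_max times_to_city)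

-- ===== LEMMAS AND PROOFS =====

-- Invariant: after k rounds, A's rebuilt list is the original suffix shifted down by k.
theorem eliminate_max_go_eq_alt (ts : List Int) (k : Int) :
    eliminate_max_go (ts.map (fun x => x - k)) k = eliminate_max_alt_go (k + (ts.length : Int)) k ts := by
  induction ts generalizing k with
  | nil => simp [eliminate_max_go, eliminate_max_alt_go]
  | cons t rest ih =>
    simp only [List.map_cons, eliminate_max_go, eliminate_max_alt_go, List.length_cons,
      List.length_map]
    push_cast
    by_cases h1 : t - k ≤ 0
    · simp [h1]
    · have h1' : ¬ (t - k ≤ 0) := h1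
      simp only [h1', if_false]
      by_cases h2 : t - k ≥ (k + ((rest.length : Int) + 1)) - k
      · rw [if_pos (by omega), if_pos h2]
      · rw [if_neg (by omega), if_neg h2]
        have : (rest.map (fun x => x - k)).map (fun x => x - 1) = rest.map (fun x => x - (k + 1)) := by
          simp only [List.map_map]; apply List.map_congr_left; intro a _; simp; ring
        rw [this, ih (k + 1)]
        congr 1
        ring

-- ===== VERDICT (by name: the statement is the Claim_ definition above) =====
theorem eliminate_max_spec : Claim_equal_eliminate_max := by
  intro ts _
  unfold Spec_eliminate_max eliminate_max eliminate_max_alt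
  have h := eliminate_max_go_eq_alt ts 0
  simpa using h
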